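-- pv_equiv track=rewrite | github.com/pytorch/pytorch | memory_allocator/profile_mine.py | greedy_by_longest_and_size_with_first_gap
-- ===== SOURCE A (Python) =====
-- def intersect(xs, ys):
--     return max(xs[1], ys[1]) - min(xs[0], ys[0]) - (xs[1] - xs[0]) - (ys[1] - ys[0])
--
-- def intersect_lvr(xs, ys):
--     return intersect(xs, ys) <= 0
--
-- def find_first_gap(record, ordered_allocs):
--     (begin_t, end_t), size_t = record
--     best_gap = float("inf")
--     best_offset = None
--     prev_offset = 0
--
--     for (begin_x, end_x), (offset_x, size_x) in ordered_allocs: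
--         if not intersect_lvr((begin_x, end_x), (begin_t, end_t)):
--             continue
--
--         gap = offset_x - prev_offset
--         if size_t <= gap < best_gap:
--             best_offset = prev_offset
--             break
--
--         prev_offset = max(prev_offset, offset_x + size_x)
--
--     if best_offset is None:
--         best_offset = prev_offset
--     return best_offset
--
-- def greedy_by_longest_and_size_with_first_gap(ordered_records):
--     ordered_records.sort(key=lambda x: (x[0][1] - x[0][0]), reverse=True)
--     ordered_allocs = []
--     inorder_of_decision_allocs = []
--     total_consumption = 0
--     for record in ordered_records:
--         best_offset = find_first_gap(record, ordered_allocs)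
--
--         (begin_t, end_t), size_t = record
--         total_consumption = max(total_consumption, best_offset + size_t)
--
--         ordered_allocs.append(((begin_t, end_t), (best_offset, size_t)))
--         inorder_of_decision_allocs.append(((begin_t, end_t), (best_offset, size_t)))
--         ordered_allocs.sort(key=lambda x: x[1][0])
--
--     return inorder_of_decision_allocs, total_consumption
-- ===== SOURCE B (Python) =====
-- def greedy_by_longest_and_size_with_first_gap(ordered_records):
--     # Note: like the original, this sorts ordered_records in place.
--     ordered_records.sort(key=lambda x: (x[0][1] - x[0][0]), reverse=True)
--     allocs = []
--     total_consumption = 0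
--     for (begin_t, end_t), size_t in ordered_records:
--         live = [a for a in allocs
--                 if max(a[0][1], end_t) - min(a[0][0], begin_t)
--                    - (a[0][1] - a[0][0]) - (end_t - begin_t) <= 0]
--         # the chosen offset is the least nonnegative candidate (0 or the end of
--         # a live block) that conflicts with no live block; no sorting, no scan
--         offset = min(c for c in [0] + [o + s for _, (o, s) in live]
--                      if c >= 0 and all(o + s <= c or o >= c + size_t
--                                        for _, (o, s) in live))
--         total_consumption = max(total_consumption, offset + size_t)
--         allocs.append(((begin_t, end_t), (offset, size_t)))
--     return allocs, total_consumption
-- ===== Notes on version B (the rewrite author's own statement) =====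
-- stated objective: alternative
-- what changed: B replaces A's offset-sorted allocation list and its first-fit running-max gap scan entirely: per record it filters the live allocations and picks the offset as the minimum nonnegative candidate (0 or the end of a live block) that conflicts with no live block - no sorting of allocations and no sequential gap scan remain.
import Mathlib
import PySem

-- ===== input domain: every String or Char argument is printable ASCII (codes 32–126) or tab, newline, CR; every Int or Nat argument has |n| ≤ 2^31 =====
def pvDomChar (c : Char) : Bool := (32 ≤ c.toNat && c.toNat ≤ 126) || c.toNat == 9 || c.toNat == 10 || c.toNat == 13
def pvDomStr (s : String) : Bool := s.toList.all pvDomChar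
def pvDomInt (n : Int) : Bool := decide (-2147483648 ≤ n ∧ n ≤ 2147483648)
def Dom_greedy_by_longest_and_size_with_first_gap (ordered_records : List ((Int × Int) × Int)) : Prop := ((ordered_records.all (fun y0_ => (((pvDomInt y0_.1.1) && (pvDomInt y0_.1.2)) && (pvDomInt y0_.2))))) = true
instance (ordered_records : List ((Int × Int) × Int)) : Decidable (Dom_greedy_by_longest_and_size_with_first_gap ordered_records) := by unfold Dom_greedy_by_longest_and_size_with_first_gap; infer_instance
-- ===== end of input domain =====

-- B replaces A's offset-sorted allocation list and its first-fit gap scan by a direct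
-- minimum over candidate offsets (0 or the end of a live block) that conflict with no
-- live block (objective: alternative).  Both A and B sort the ARGUMENT list in place in
-- Python; the equivalence proved here is about the RETURN value.

-- ===== PORT A =====
def pvIntersect (xs ys : Int × Int) : Int :=
  max xs.2 ys.2 - min xs.1 ys.1 - (xs.2 - xs.1) - (ys.2 - ys.1)

def pvIntersectLvr (xs ys : Int × Int) : Bool := decide (pvIntersect xs ys ≤ 0)

-- best_gap = float('inf') is modelled as `none`; `pvLtBestGap gap none = true` is exactly
-- Python's `gap < float('inf')` for an int gap (hand-ported, exact: best_gap is never reassigned).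
def pvLtBestGap (gap : Int) (bestGap : Option Int) : Bool :=
  match bestGap with
  | none => true
  | some g => decide (gap < g)

-- the for-loop of find_first_gap; the `break` (which sets best_offset := prev_offset and ends the
-- function) is the early return, the final `if best_offset is None` fallback is the [] case
def pvFindGapLoop (t : Int × Int) (size_t : Int)
    (allocs : List ((Int × Int) × (Int × Int))) (bestGap : Option Int) (prev : Int) : Int :=
  match allocs with
  | [] => prev
  | ((begin_x, end_x), (offset_x, size_x)) :: rest =>
    if ¬ (pvIntersectLvr (begin_x, end_x) t = true) then
      pvFindGapLoop t size_t rest bestGap prev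
    else
      let gap := offset_x - prev
      if size_t ≤ gap ∧ pvLtBestGap gap bestGap = true then prev
      else pvFindGapLoop t size_t rest bestGap (max prev (offset_x + size_x))

def pvFindFirstGap (record : (Int × Int) × Int)
    (ordered_allocs : List ((Int × Int) × (Int × Int))) : Int :=
  pvFindGapLoop record.1 record.2 ordered_allocs none 0

def pvLoopA (recs : List ((Int × Int) × Int))
    (ordered_allocs inorder : List ((Int × Int) × (Int × Int))) (total : Int) :
    (List ((Int × Int) × (Int × Int))) × Int :=
  match recs with
  | [] => (inorder, total)
  | record :: rest =>
    let best_offset := pvFindFirstGap record ordered_allocs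
    let a := (record.1, (best_offset, record.2))
    pvLoopA rest (PySem.List.sorted (ordered_allocs ++ [a]) (fun x => x.2.1))
      (inorder ++ [a]) (max total (best_offset + record.2))

def greedy_by_longest_and_size_with_first_gap (ordered_records : List ((Int × Int) × Int)) :
    (List ((Int × Int) × (Int × Int))) × Int :=
  pvLoopA (PySem.List.sorted ordered_records (fun x => x.1.2 - x.1.1) true) [] [] 0

-- ===== PORT B =====
-- the feasibility test of Source B: c >= 0 and no live block conflicts with [c, c+size_t)
def pvFeasB (st c : Int) (live : List ((Int × Int) × (Int × Int))) : Bool :=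
  decide (0 ≤ c) &&
    live.all (fun a => decide (a.2.1 + a.2.2 ≤ c) || decide (c + st ≤ a.2.1))

-- Python's min() over a nonempty list of ints (hand-ported, exact: the minimal value)
def pvMinList (c : Int) (cs : List Int) : Int := cs.foldl min c

def pvLoopB (recs : List ((Int × Int) × Int))
    (allocs : List ((Int × Int) × (Int × Int))) (total : Int) :
    (List ((Int × Int) × (Int × Int))) × Int :=
  match recs with
  | [] => (allocs, total)
  | ((begin_t, end_t), size_t) :: rest =>
    let live := allocs.filter (fun a =>
      decide (max a.1.2 end_t - min a.1.1 begin_t - (a.1.2 - a.1.1) - (end_t - begin_t) ≤ 0))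
    let filtered := (0 :: live.map (fun a => a.2.1 + a.2.2)).filter (fun c => pvFeasB size_t c live)
    -- min() of the generator; the [] branch is unreachable (the filtered list is
    -- never empty: proved in pvStep below), so min() never raises
    let offset := match filtered with | [] => 0 | c :: cs => pvMinList c cs
    pvLoopB rest (allocs ++ [((begin_t, end_t), (offset, size_t))]) (max total (offset + size_t))

def greedy_by_longest_and_size_with_first_gap_alt (ordered_records : List ((Int × Int) × Int)) :
    (List ((Int × Int) × (Int × Int))) × Int :=
  pvLoopB (PySem.List.sorted ordered_records (fun x => x.1.2 - x.1.1) true) [] 0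

-- ===== PRECONDITION & SPEC =====
def Spec_greedy_by_longest_and_size_with_first_gap (ordered_records : List ((Int × Int) × Int)) (out : (List ((Int × Int) × (Int × Int))) × Int) : Prop := out = greedy_by_longest_and_size_with_first_gap_alt ordered_records
instance (ordered_records : List ((Int × Int) × Int)) (out : (List ((Int × Int) × (Int × Int))) × Int) : Decidable (Spec_greedy_by_longest_and_size_with_first_gap ordered_records out) := by unfold Spec_greedy_by_longest_and_size_with_first_gap; infer_instance

-- ===== CLAIM (what is proved, stated in full; the proofs are below) =====
def Claim_equal_greedy_by_longest_and_size_with_first_gap : Prop := ∀ (ordered_records : List ((Int × Int) × Int)), Dom_greedy_by_longest_and_size_with_first_gap ordered_records → Spec_greedy_by_longest_and_size_with_first_gap ordered_records (greedy_by_longest_and_size_with_first_gap ordered_records)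

-- ===== LEMMAS AND PROOFS =====

-- a clean form of A's scan (skips pre-filtered away, best_gap gone): used only in proofs
def pvFirstFit (size_t : Int) (live : List ((Int × Int) × (Int × Int))) (offset : Int) : Int :=
  match live with
  | [] => offset
  | (_, (offset_x, size_x)) :: rest =>
    if offset_x - offset ≥ size_t then offset
    else pvFirstFit size_t rest (max offset (offset_x + size_x))

-- Python's stable sort of xs ++ [x] is: insert x (after all equal keys) into the stable sort of xs.
theorem pvSorted_snoc {α : Type} (xs : List α) (x : α) (k : α → Int) :
    PySem.List.sorted (xs ++ [x]) k =
      PySem.List.insertBy (fun a b => decide (k a < k b)) x (PySem.List.sorted xs k) := by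
  rw [PySem.List.sorted_eq_foldl_insertBy, PySem.List.sorted_eq_foldl_insertBy, List.foldl_append]
  rfl

theorem pvInsertBy_front {α : Type} (bef : α → α → Bool) (x : α) (zs : List α)
    (h : ∀ z ∈ zs, bef x z = true) : PySem.List.insertBy bef x zs = x :: zs := by
  cases zs with
  | nil => rfl
  | cons z zs => simp [PySem.List.insertBy, h z (by simp)]

-- filtering a key-sorted list commutes with the stable insertion of one element
theorem pvInsertBy_filter {α : Type} (k : α → Int) (p : α → Bool) (x : α) (ys : List α)
    (hs : ys.Pairwise (fun a b => k a ≤ k b)) :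
    (PySem.List.insertBy (fun a b => decide (k a < k b)) x ys).filter p =
      if p x then PySem.List.insertBy (fun a b => decide (k a < k b)) x (ys.filter p)
      else ys.filter p := by
  induction ys with
  | nil =>
    cases hpx : p x <;> simp [PySem.List.insertBy, hpx]
  | cons y ys ih =>
    rcases List.pairwise_cons.mp hs with ⟨hy, hys⟩
    by_cases hxy : k x < k y
    · cases hpx : p x <;> cases hpy : p y <;>
        simp [PySem.List.insertBy, hxy, hpx, hpy]
      rw [pvInsertBy_front]
      intro z hz
      have hz' : z ∈ ys := List.mem_of_mem_filter hz
      simp only [decide_eq_true_eq]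
      exact lt_of_lt_of_le hxy (hy z hz')
    · cases hpy : p y <;>
        simp [PySem.List.insertBy, hxy, hpy, ih hys] <;>
        cases hpx : p x <;> simp [PySem.List.insertBy, hxy, hpx]

-- filtering commutes with Python's stable sort
theorem pvFilter_sorted {α : Type} (k : α → Int) (p : α → Bool) (xs : List α) :
    (PySem.List.sorted xs k).filter p = PySem.List.sorted (xs.filter p) k := by
  induction xs using List.reverseRecOn with
  | nil => rfl
  | append_singleton xs x ih =>
    rw [pvSorted_snoc, pvInsertBy_filter k p x _ (PySem.List.sorted_pairwise xs k),
      List.filter_append]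
    cases hpx : p x
    · simpa [hpx] using ih
    · simp only [hpx, if_true, List.filter_cons, cond_true]
      rw [ih, ← pvSorted_snoc]
      simp [hpx]

-- re-sorting after a snoc of an already-sorted list = sorting the unsorted list after the snoc
theorem pvSorted_snoc_sorted {α : Type} (xs : List α) (x : α) (k : α → Int) :
    PySem.List.sorted (PySem.List.sorted xs k ++ [x]) k = PySem.List.sorted (xs ++ [x]) k := by
  rw [pvSorted_snoc, pvSorted_snoc, PySem.List.sorted_sorted]

-- A's skip-in-the-loop scan = the clean scan of the filtered list
theorem pvGapLoop_eq_firstFit (t : Int × Int) (st : Int)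
    (allocs : List ((Int × Int) × (Int × Int))) (prev : Int) :
    pvFindGapLoop t st allocs none prev =
      pvFirstFit st (allocs.filter (fun a => pvIntersectLvr a.1 t)) prev := by
  induction allocs generalizing prev with
  | nil => rfl
  | cons a rest ih =>
    obtain ⟨⟨bx, ex⟩, ox, sx⟩ := a
    by_cases hI : pvIntersectLvr (bx, ex) t = true
    · by_cases hg : st ≤ ox - prev
      · simp [pvFindGapLoop, pvFirstFit, hI, hg, pvLtBestGap]
      · simp [pvFindGapLoop, pvFirstFit, hI, hg, pvLtBestGap, ih]
    · simp [pvFindGapLoop, pvFirstFit, hI, ih]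

-- minimality half: the scan's result is ≤ every conflict-free offset c ≥ prev
theorem pvFirstFit_le (st : Int) (live : List ((Int × Int) × (Int × Int))) (prev c : Int)
    (hpc : prev ≤ c)
    (hfeas : ∀ a ∈ live, a.2.1 + a.2.2 ≤ c ∨ c + st ≤ a.2.1) :
    pvFirstFit st live prev ≤ c := by
  induction live generalizing prev with
  | nil => simpa [pvFirstFit] using hpc
  | cons a rest ih =>
    obtain ⟨⟨bx, ex⟩, ox, sx⟩ := a
    by_cases hg : ox - prev ≥ st
    · simpa [pvFirstFit, hg] using hpc
    · have ha := hfeas ((bx, ex), (ox, sx)) (by simp)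
      simp only at ha
      have hend : ox + sx ≤ c := by
        rcases ha with h | h
        · exact h
        · exact absurd (by omega : st ≤ ox - prev) hg
      simp only [pvFirstFit, hg, if_false]
      exact ih (max prev (ox + sx)) (by omega)
        (fun a ha' => hfeas a (by simp [ha']))

-- feasibility half: on an offset-sorted list the scan lands on a candidate (prev or the end
-- of some block) that conflicts with no block
theorem pvFirstFit_spec (st : Int) (live : List ((Int × Int) × (Int × Int))) (prev : Int)
    (hs : live.Pairwise (fun a b => a.2.1 ≤ b.2.1)) :
    prev ≤ pvFirstFit st live prev ∧
    (pvFirstFit st live prev = prev ∨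
      pvFirstFit st live prev ∈ live.map (fun a => a.2.1 + a.2.2)) ∧
    (∀ a ∈ live, a.2.1 + a.2.2 ≤ pvFirstFit st live prev ∨
      pvFirstFit st live prev + st ≤ a.2.1) := by
  induction live generalizing prev with
  | nil => simp [pvFirstFit]
  | cons a rest ih =>
    obtain ⟨⟨bx, ex⟩, ox, sx⟩ := a
    rcases List.pairwise_cons.mp hs with ⟨hord, hrest⟩
    by_cases hg : ox - prev ≥ st
    · refine ⟨by simp [pvFirstFit, hg], by simp [pvFirstFit, hg], ?_⟩
      intro b hb
      simp only [pvFirstFit, hg, if_true]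
      rcases List.mem_cons.mp hb with rfl | hb'
      · right; dsimp only; omega
      · right
        have := hord b hb'
        dsimp only at this
        omega
    · obtain ⟨h1, h2, h3⟩ := ih (max prev (ox + sx)) hrest
      simp only [pvFirstFit, hg, if_false]
      refine ⟨by omega, ?_, ?_⟩
      · rcases h2 with h | h
        · rcases max_choice prev (ox + sx) with hm | hm
          · exact Or.inl (h.trans hm)
          · refine Or.inr ?_
            simp only [List.map_cons, List.mem_cons]
            exact Or.inl (h.trans hm)
        · refine Or.inr ?_
          simp only [List.map_cons, List.mem_cons]
          exact Or.inr h
      · intro b hb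
        rcases List.mem_cons.mp hb with rfl | hb'
        · left; dsimp only; omega
        · exact h3 b hb'

-- min() facts: the fold is a member of the list and a lower bound of it
theorem pvMinList_cons (c d : Int) (ds : List Int) :
    pvMinList c (d :: ds) = pvMinList (min c d) ds := rfl

theorem pvMinList_mem (c : Int) (cs : List Int) : pvMinList c cs = c ∨ pvMinList c cs ∈ cs := by
  induction cs generalizing c with
  | nil => exact Or.inl rfl
  | cons d ds ih =>
    rw [pvMinList_cons]
    rcases ih (min c d) with h | h
    · rcases min_choice c d with hm | hm
      · exact Or.inl (h.trans hm)
      · exact Or.inr (List.mem_cons.mpr (Or.inl (h.trans hm)))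
    · exact Or.inr (List.mem_cons.mpr (Or.inr h))

theorem pvMinList_le_base (c : Int) (cs : List Int) : pvMinList c cs ≤ c := by
  induction cs generalizing c with
  | nil => exact le_refl c
  | cons d ds ih => rw [pvMinList_cons]; exact le_trans (ih (min c d)) (min_le_left c d)

theorem pvMinList_le (c : Int) (cs : List Int) (x : Int) (hx : x = c ∨ x ∈ cs) :
    pvMinList c cs ≤ x := by
  induction cs generalizing c with
  | nil =>
    rcases hx with rfl | hx
    · exact le_refl x
    · simp at hx
  | cons d ds ih =>
    rw [pvMinList_cons]
    rcases hx with rfl | hx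
    · exact le_trans (pvMinList_le_base _ _) (min_le_left _ _)
    · rcases List.mem_cons.mp hx with rfl | hx'
      · exact le_trans (pvMinList_le_base _ _) (min_le_right _ _)
      · exact ih (min c d) (Or.inr hx')

theorem pvMinList_eq_of (c : Int) (cs : List Int) (r : Int)
    (hmem : r = c ∨ r ∈ cs) (hlb : ∀ x, (x = c ∨ x ∈ cs) → r ≤ x) :
    pvMinList c cs = r := by
  have h1 : pvMinList c cs ≤ r := pvMinList_le c cs r hmem
  have h2 : r ≤ pvMinList c cs := hlb _ (pvMinList_mem c cs)
  omega

-- the per-record step: A's gap search over the offset-sorted list = B's minimum candidate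
theorem pvStep (bt et st : Int) (inorder : List ((Int × Int) × (Int × Int))) :
    pvFindFirstGap ((bt, et), st) (PySem.List.sorted inorder (fun a => a.2.1)) =
      (match ((0 :: (inorder.filter (fun a =>
          decide (max a.1.2 et - min a.1.1 bt - (a.1.2 - a.1.1) - (et - bt) ≤ 0))).map
            (fun a => a.2.1 + a.2.2)).filter
          (fun c => pvFeasB st c (inorder.filter (fun a =>
            decide (max a.1.2 et - min a.1.1 bt - (a.1.2 - a.1.1) - (et - bt) ≤ 0))))) with
       | [] => 0 | c :: cs => pvMinList c cs) := by
  set live := inorder.filter (fun a =>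
      decide (max a.1.2 et - min a.1.1 bt - (a.1.2 - a.1.1) - (et - bt) ≤ 0)) with hlivedef2
  set filtered := (0 :: live.map (fun a => a.2.1 + a.2.2)).filter
      (fun c => pvFeasB st c live) with hfildef
  have hlivedef : (fun a : (Int × Int) × (Int × Int) => pvIntersectLvr a.1 (bt, et)) =
      (fun a => decide (max a.1.2 et - min a.1.1 bt - (a.1.2 - a.1.1) - (et - bt) ≤ 0)) := by
    funext a
    simp [pvIntersectLvr, pvIntersect]
  have hA : pvFindFirstGap ((bt, et), st) (PySem.List.sorted inorder (fun a => a.2.1)) =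
      pvFirstFit st (PySem.List.sorted live (fun a => a.2.1)) 0 := by
    rw [pvFindFirstGap, pvGapLoop_eq_firstFit, hlivedef,
      pvFilter_sorted (fun a => a.2.1) _ inorder]
  set S := PySem.List.sorted live (fun a => a.2.1) with hS
  set r := pvFirstFit st S 0 with hr
  have hperm : S.Perm live := PySem.List.sorted_perm live _ _
  obtain ⟨h0r, hmemS, hfeasS⟩ := pvFirstFit_spec st S 0 (PySem.List.sorted_pairwise live _)
  -- feasibility of r over live
  have hfeas : ∀ a ∈ live, a.2.1 + a.2.2 ≤ r ∨ r + st ≤ a.2.1 := by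
    intro a ha
    exact hfeasS a (hperm.mem_iff.mpr ha)
  have hmem : r = 0 ∨ r ∈ live.map (fun a => a.2.1 + a.2.2) := by
    rcases hmemS with h | h
    · exact Or.inl h
    · right
      rcases List.mem_map.mp h with ⟨a, ha, hv⟩
      exact List.mem_map.mpr ⟨a, hperm.mem_iff.mp ha, hv⟩
  have hfeasB : pvFeasB st r live = true := by
    simp only [pvFeasB, Bool.and_eq_true, decide_eq_true_eq, List.all_eq_true]
    refine ⟨h0r, ?_⟩
    intro a ha
    rcases hfeas a ha with h | h <;> simp [h]
  have hrfil : r ∈ filtered := by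
    apply List.mem_filter.mpr
    refine ⟨?_, hfeasB⟩
    rcases hmem with h | h
    · simp [h]
    · simp [h]
  have hlb : ∀ x ∈ filtered, r ≤ x := by
    intro x hx
    rcases List.mem_filter.mp hx with ⟨_, hfx⟩
    simp only [pvFeasB, Bool.and_eq_true, decide_eq_true_eq, List.all_eq_true] at hfx
    obtain ⟨h0x, hfx⟩ := hfx
    have hfxS : ∀ a ∈ S, a.2.1 + a.2.2 ≤ x ∨ x + st ≤ a.2.1 := by
      intro a ha
      have := hfx a (hperm.mem_iff.mp ha)
      rcases Bool.or_eq_true _ _ |>.mp this with h | h <;>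
        simp only [decide_eq_true_eq] at h
      · exact Or.inl h
      · exact Or.inr h
    exact pvFirstFit_le st S 0 x h0x hfxS
  rw [hA]
  cases hfil : filtered with
  | nil => rw [hfil] at hrfil; simp at hrfil
  | cons c cs =>
    rw [hfil] at hrfil hlb
    exact (pvMinList_eq_of c cs r (List.mem_cons.mp hrfil)
      (fun x hx => hlb x (List.mem_cons.mpr hx))).symm

-- loop invariant: A's ordered_allocs is the stable sort by offset of the decision-order list
theorem pvLoopA_eq_loopB (recs : List ((Int × Int) × Int))
    (inorder : List ((Int × Int) × (Int × Int))) (total : Int) :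
    pvLoopA recs (PySem.List.sorted inorder (fun a => a.2.1)) inorder total =
      pvLoopB recs inorder total := by
  induction recs generalizing inorder total with
  | nil => rfl
  | cons r rest ih =>
    obtain ⟨⟨bt, et⟩, st⟩ := r
    simp only [pvLoopA, pvLoopB, pvStep bt et st inorder]
    rw [pvSorted_snoc_sorted]
    exact ih (inorder ++ [_]) _

-- ===== VERDICT (by name: the statement is the Claim_ definition above) =====
theorem greedy_by_longest_and_size_with_first_gap_spec : Claim_equal_greedy_by_longest_and_size_with_first_gap := by
  intro ordered_records _
  unfold Spec_greedy_by_longest_and_size_with_first_gap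
  unfold greedy_by_longest_and_size_with_first_gap greedy_by_longest_and_size_with_first_gap_alt
  have h := pvLoopA_eq_loopB
    (PySem.List.sorted ordered_records (fun x => x.1.2 - x.1.1) true) [] 0
  simpa using h
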